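-- pv_equiv track=rewrite | github.com/TonicAI/condenser | subset.py | compute_downstream_tables
-- ===== SOURCE A (Python) =====
-- def compute_downstream_tables(target_table, order):
--     downstream_tables = []
--     in_downstream = False
--     for strata in order:
--         if in_downstream:
--             downstream_tables.extend(strata)
--         if target_table in strata:
--             in_downstream = True
--     return downstream_tables
-- ===== SOURCE B (Python) =====
-- def compute_downstream_tables(target_table, order):
--     for i, strata in enumerate(order):
--         if target_table in strata:
--             return [t for rest in order[i + 1:] for t in rest]
--     return []
-- ===== Notes on version B (the rewrite author's own statement) =====
-- stated objective: simpler
-- what changed: Instead of one pass carrying a boolean flag and extending an accumulator, B first locates the first stratum containing target_table and then returns the flattened concatenation of the remaining strata (early return, no state).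
import Mathlib
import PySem

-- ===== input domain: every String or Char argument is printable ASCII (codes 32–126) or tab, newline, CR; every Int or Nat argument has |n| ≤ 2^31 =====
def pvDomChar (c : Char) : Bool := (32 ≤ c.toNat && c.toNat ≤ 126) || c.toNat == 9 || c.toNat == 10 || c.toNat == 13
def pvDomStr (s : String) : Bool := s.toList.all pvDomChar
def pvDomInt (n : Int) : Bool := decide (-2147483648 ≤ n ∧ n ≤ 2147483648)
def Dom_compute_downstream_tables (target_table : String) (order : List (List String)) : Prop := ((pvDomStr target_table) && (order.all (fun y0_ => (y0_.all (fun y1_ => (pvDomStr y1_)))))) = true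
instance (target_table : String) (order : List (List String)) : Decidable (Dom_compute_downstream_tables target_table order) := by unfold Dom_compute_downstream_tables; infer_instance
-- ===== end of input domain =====

-- B separates boundary-finding from result-building (find first stratum containing target, flatten the rest)
-- instead of A's single pass carrying a boolean flag; objective: simpler.

-- ===== PORT A =====
-- one loop over order, state = (downstream_tables, in_downstream)
def compute_downstream_tables (target_table : String) (order : List (List String)) : List String :=
  (order.foldl
    (fun (st : List String × Bool) strata =>
      (if st.2 then st.1 ++ strata else st.1,
       if strata.contains target_table then true else st.2))
    ([], false)).1

-- ===== PORT B =====
-- find the first stratum containing target_table; return the flattened remainder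
def cdtFindRest (target_table : String) : List (List String) → List String
  | [] => []
  | strata :: rest =>
    if strata.contains target_table then rest.flatMap id
    else cdtFindRest target_table rest

def compute_downstream_tables_alt (target_table : String) (order : List (List String)) : List String :=
  cdtFindRest target_table order

-- ===== PRECONDITION & SPEC =====
def Spec_compute_downstream_tables (target_table : String) (order : List (List String)) (out : List String) : Prop := out = compute_downstream_tables_alt target_table order
instance (target_table : String) (order : List (List String)) (out : List String) : Decidable (Spec_compute_downstream_tables target_table order out) := by unfold Spec_compute_downstream_tables; infer_instance

-- ===== CLAIM (what is proved, stated in full; the proofs are below) =====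
def Claim_equal_compute_downstream_tables : Prop := ∀ (target_table : String) (order : List (List String)), Dom_compute_downstream_tables target_table order → Spec_compute_downstream_tables target_table order (compute_downstream_tables target_table order)

-- ===== LEMMAS AND PROOFS =====

-- once the flag is true A appends every remaining stratum
theorem cdt_foldl_true (target_table : String) (order : List (List String)) (acc : List String) :
    (order.foldl
      (fun (st : List String × Bool) strata =>
        (if st.2 then st.1 ++ strata else st.1,
         if strata.contains target_table then true else st.2))
      (acc, true)).1 = acc ++ order.flatMap id := by
  induction order generalizing acc with
  | nil => simp
  | cons s rest ih =>
    simp only [List.foldl, List.flatMap_cons, id]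
    rw [show (if s.contains target_table then true else true) = true by simp]
    rw [ih]
    simp [List.append_assoc]

-- while the flag is false A's loop computes exactly B's scan
theorem cdt_foldl_false (target_table : String) (order : List (List String)) (acc : List String) :
    (order.foldl
      (fun (st : List String × Bool) strata =>
        (if st.2 then st.1 ++ strata else st.1,
         if strata.contains target_table then true else st.2))
      (acc, false)).1 = acc ++ cdtFindRest target_table order := by
  induction order generalizing acc with
  | nil => simp [cdtFindRest]
  | cons s rest ih =>
    simp only [List.foldl, cdtFindRest]
    by_cases h : s.contains target_table
    · simp only [h, if_true, show (false = true) = False by simp, if_neg (fun h => h)]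
      rw [cdt_foldl_true]
    · simp only [h, show (false = true) = False by simp, if_neg (fun h => h)]
      rw [ih]

-- ===== VERDICT (by name: the statement is the Claim_ definition above) =====
theorem compute_downstream_tables_spec : Claim_equal_compute_downstream_tables := by
  intro target_table order _
  unfold Spec_compute_downstream_tables compute_downstream_tables compute_downstream_tables_alt
  rw [cdt_foldl_false]
  simp
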